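-- pv_equiv track=rewrite | github.com/PauSeekings/zlema_trader | backend/services/market_status_service.py | _get_nth_sunday
-- ===== SOURCE A (Python) =====
-- def _get_nth_sunday(year: int, month: int, n: int) -> int:
--     """Get the date of the nth Sunday in a given month/year"""
--     import calendar
--     sunday_count = 0
--     last_day = calendar.monthrange(year, month)[1]
--
--     for day in range(1, last_day + 1):
--         if calendar.weekday(year, month, day) == 6:  # Sunday = 6
--             sunday_count += 1
--             if sunday_count == n:
--                 return day
--     return last_day
-- ===== SOURCE B (Python) =====
-- def _get_nth_sunday(year: int, month: int, n: int) -> int: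
--     """Get the date of the nth Sunday in a given month/year"""
--     # month length by arithmetic (28 + parity/remainder trick), leap via nested test
--     leap = (year % 16 == 0) if year % 100 == 0 else (year % 4 == 0)
--     last_day = 28 + (month + month // 8) % 2 + 2 % month + 2 * (1 // month) \
--         + (leap and month == 2)
--     # Zeller's congruence for the weekday of the 1st (h: 0 = Saturday, 1 = Sunday)
--     m, y = (month + 12, year - 1) if month < 3 else (month, year)
--     h = (1 + (13 * (m + 1)) // 5 + y % 100 + (y % 100) // 4 + (y // 100) // 4
--          + 5 * (y // 100)) % 7
--     first_sunday = 1 + (1 - h) % 7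
--     candidate = first_sunday + (n - 1) * 7
--     return candidate if 1 <= candidate <= last_day else last_day
-- ===== Notes on version B (the rewrite author's own statement) =====
-- stated objective: alternative
-- what changed: Replaces the day-by-day calendar scan with closed arithmetic: Zeller's congruence gives the weekday of the 1st (hence the first Sunday), the nth Sunday is first + (n-1)*7 guarded against [1, last_day], and the month length comes from an arithmetic formula with a nested leap-year test instead of calendar.monthrange.
import Mathlib
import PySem

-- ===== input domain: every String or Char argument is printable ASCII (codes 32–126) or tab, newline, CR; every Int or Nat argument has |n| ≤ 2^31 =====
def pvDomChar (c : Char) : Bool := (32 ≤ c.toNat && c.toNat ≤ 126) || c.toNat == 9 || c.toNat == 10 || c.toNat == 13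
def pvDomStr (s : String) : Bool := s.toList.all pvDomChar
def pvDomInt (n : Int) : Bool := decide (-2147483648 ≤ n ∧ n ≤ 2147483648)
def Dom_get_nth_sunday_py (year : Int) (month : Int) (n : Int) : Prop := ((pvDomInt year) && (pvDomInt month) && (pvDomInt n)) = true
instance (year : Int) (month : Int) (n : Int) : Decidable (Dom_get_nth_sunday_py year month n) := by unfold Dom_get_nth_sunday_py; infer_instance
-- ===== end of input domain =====

-- B replaces A's day-by-day calendar scan with closed arithmetic: Zeller's congruence for the
-- weekday of the 1st and an arithmetic month-length formula (simpler: no scan, no tables).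

-- ===== PORT A =====
-- calendar.isleap(y)  (exact: Python's %, divisor positive)
def pvIsLeap (y : Int) : Bool :=
  PySem.Int.mod y 4 = 0 && (PySem.Int.mod y 100 ≠ 0 || PySem.Int.mod y 400 = 0)

-- days before month m in year y (cumulative month lengths), as used by the proleptic-Gregorian date ordinal
def pvDBM (y : Int) (m : Int) : Int :=
  (if m = 1 then 0 else if m = 2 then 31 else if m = 3 then 59 else if m = 4 then 90
   else if m = 5 then 120 else if m = 6 then 151 else if m = 7 then 181 else if m = 8 then 212
   else if m = 9 then 243 else if m = 10 then 273 else if m = 11 then 304 else 334)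
  + (if 2 < m ∧ pvIsLeap y = true then 1 else 0)

-- calendar.weekday(y, m, d): Monday = 0 … Sunday = 6 (exact for 1 ≤ m ≤ 12 via the date ordinal;
-- calendar.weekday accepts ANY year, reducing it mod the 400-year cycle, which this closed form matches)
def pvWeekday (y : Int) (m : Int) (d : Int) : Int :=
  PySem.Int.mod (365 * (y - 1) + PySem.Int.floordiv (y - 1) 4 - PySem.Int.floordiv (y - 1) 100
    + PySem.Int.floordiv (y - 1) 400 + pvDBM y m + d + 6) 7

-- calendar.monthrange(y, m)[1]  (exact for 1 ≤ m ≤ 12)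
def pvMonthLen (y : Int) (m : Int) : Int :=
  if m = 2 then (if pvIsLeap y = true then 29 else 28)
  else if m = 4 ∨ m = 6 ∨ m = 9 ∨ m = 11 then 30 else 31

-- A's for-loop with early return, as structural recursion over the day list
def pvALoop (year month n : Int) : List Int → Int → Option Int
  | [], _ => none
  | d :: ds, cnt =>
    if pvWeekday year month d = 6 then
      if cnt + 1 = n then some d else pvALoop year month n ds (cnt + 1)
    else pvALoop year month n ds cnt

def get_nth_sunday_py (year : Int) (month : Int) (n : Int) : Int :=
  let last_day := pvMonthLen year month
  match pvALoop year month n (PySem.List.pyRange 1 (last_day + 1) 1) 0 with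
  | some d => d
  | none => last_day

-- ===== PORT B =====
-- Zeller's congruence h (0 = Saturday, 1 = Sunday) for day 1 of the month, as in Source B
def pvZellerH (year : Int) (month : Int) : Int :=
  let my := if month < 3 then (month + 12, year - 1) else (month, year)
  let m := my.1
  let y := my.2
  PySem.Int.mod (1 + PySem.Int.floordiv (13 * (m + 1)) 5 + PySem.Int.mod y 100
    + PySem.Int.floordiv (PySem.Int.mod y 100) 4
    + PySem.Int.floordiv (PySem.Int.floordiv y 100) 4 + 5 * PySem.Int.floordiv y 100) 7

def get_nth_sunday_py_alt (year : Int) (month : Int) (n : Int) : Int :=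
  let leap := if PySem.Int.mod year 100 = 0 then PySem.Int.mod year 16 = 0 else PySem.Int.mod year 4 = 0
  let last_day := 28 + PySem.Int.mod (month + PySem.Int.floordiv month 8) 2
    + PySem.Int.mod 2 month + 2 * PySem.Int.floordiv 1 month
    + (if leap ∧ month = 2 then 1 else 0)
  let h := pvZellerH year month
  let first_sunday := 1 + PySem.Int.mod (1 - h) 7
  let candidate := first_sunday + (n - 1) * 7
  if 1 ≤ candidate ∧ candidate ≤ last_day then candidate else last_day

-- ===== PRECONDITION & SPEC =====
-- Python raises calendar.IllegalMonthError for month outside 1..12; any year and n are accepted.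
def Pre_get_nth_sunday_py (year : Int) (month : Int) (n : Int) : Prop := 1 ≤ month ∧ month ≤ 12
instance (year : Int) (month : Int) (n : Int) : Decidable (Pre_get_nth_sunday_py year month n) := by unfold Pre_get_nth_sunday_py; infer_instance
def pvWitness_get_nth_sunday_py : Int × Int × Int := (2024, 3, 2)

def Spec_get_nth_sunday_py (year : Int) (month : Int) (n : Int) (out : Int) : Prop := out = get_nth_sunday_py_alt year month n
instance (year : Int) (month : Int) (n : Int) (out : Int) : Decidable (Spec_get_nth_sunday_py year month n out) := by unfold Spec_get_nth_sunday_py; infer_instance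

-- ===== CLAIM (what is proved, stated in full; the proofs are below) =====
def Claim_equal_get_nth_sunday_py : Prop := ∀ (year : Int) (month : Int) (n : Int), Dom_get_nth_sunday_py year month n → Pre_get_nth_sunday_py year month n → Spec_get_nth_sunday_py year month n (get_nth_sunday_py year month n)

-- ===== LEMMAS AND PROOFS =====

-- Abstract versions of both programs depending only on (weekday-of-the-1st, month length, n)
def pvSLoop (w n : Int) : List Int → Int → Option Int
  | [], _ => none
  | d :: ds, cnt =>
    if (w + (d - 1)) % 7 = 6 then
      if cnt + 1 = n then some d else pvSLoop w n ds (cnt + 1)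
    else pvSLoop w n ds cnt

def pvAAbs (w L n : Int) : Int :=
  match pvSLoop w n (PySem.List.pyRange 1 (L + 1) 1) 0 with
  | some d => d
  | none => L

def pvBAbs (w L n : Int) : Int :=
  let first := 1 + (6 - w) % 7
  let candidate := first + (n - 1) * 7
  if 1 ≤ candidate ∧ candidate ≤ L then candidate else L

theorem pvWd_shift (y m d : Int) :
    pvWeekday y m d = (pvWeekday y m 1 + (d - 1)) % 7 := by
  simp only [pvWeekday]
  rw [PySem.Int.mod_eq_emod_of_pos (by omega), PySem.Int.mod_eq_emod_of_pos (by omega)]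
  omega

theorem pvALoop_eq_sLoop (y m n : Int) : ∀ (ds : List Int) (cnt : Int),
    pvALoop y m n ds cnt = pvSLoop (pvWeekday y m 1) n ds cnt := by
  intro ds
  induction ds with
  | nil => intro cnt; rfl
  | cons d ds ih =>
    intro cnt
    simp only [pvALoop, pvSLoop, ← pvWd_shift y m d]
    split_ifs <;> simp [ih]

theorem pvA_eq_abs (y m n : Int) :
    get_nth_sunday_py y m n = pvAAbs (pvWeekday y m 1) (pvMonthLen y m) n := by
  simp only [get_nth_sunday_py, pvAAbs, pvALoop_eq_sLoop]

-- B's leap test agrees with calendar.isleap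
theorem pvLeap_eq (y : Int) :
    (if PySem.Int.mod y 100 = 0 then PySem.Int.mod y 16 = 0 else PySem.Int.mod y 4 = 0) ↔ pvIsLeap y = true := by
  simp only [pvIsLeap, Bool.and_eq_true, Bool.or_eq_true, decide_eq_true_eq,
    Bool.not_eq_true', decide_eq_false_iff_not]
  rw [PySem.Int.mod_eq_emod_of_pos (a := y) (b := 4) (by omega),
      PySem.Int.mod_eq_emod_of_pos (a := y) (b := 100) (by omega),
      PySem.Int.mod_eq_emod_of_pos (a := y) (b := 400) (by omega),
      PySem.Int.mod_eq_emod_of_pos (a := y) (b := 16) (by omega)]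
  split_ifs with h <;> constructor <;> intro hh <;> simp_all <;> omega

-- B's arithmetic month length agrees with monthrange under 1 ≤ m ≤ 12
theorem pvLen_eq (y m : Int) (h1 : 1 ≤ m) (h2 : m ≤ 12) :
    28 + PySem.Int.mod (m + PySem.Int.floordiv m 8) 2
      + PySem.Int.mod 2 m + 2 * PySem.Int.floordiv 1 m
      + (if (if PySem.Int.mod y 100 = 0 then PySem.Int.mod y 16 = 0 else PySem.Int.mod y 4 = 0) ∧ m = 2 then 1 else 0)
      = pvMonthLen y m := by
  have hb := pvLeap_eq y
  by_cases hp : (if PySem.Int.mod y 100 = 0 then PySem.Int.mod y 16 = 0 else PySem.Int.mod y 4 = 0)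
  · have hl : pvIsLeap y = true := hb.mp hp
    have hres : ∀ k : Int, (if (if PySem.Int.mod y 100 = 0 then PySem.Int.mod y 16 = 0 else PySem.Int.mod y 4 = 0) ∧ k = 2 then (1:Int) else 0) = if k = 2 then 1 else 0 := by
      intro k; by_cases hk : k = 2
      · rw [if_pos ⟨hp, hk⟩, if_pos hk]
      · rw [if_neg (fun hc => hk hc.2), if_neg hk]
    rw [hres]
    simp only [pvMonthLen, hl, if_true]
    interval_cases m <;> decide
  · have hl : pvIsLeap y = false := by
      rcases Bool.eq_false_or_eq_true (pvIsLeap y) with h | h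
      · exact absurd (hb.mpr h) hp
      · exact h
    rw [if_neg (fun hc => hp hc.1)]
    simp only [pvMonthLen, hl, Bool.false_eq_true, if_false]
    interval_cases m <;> decide

-- both first-Sunday offsets, packed so periodicity and the finite check talk about one object
def pvPair (y m : Int) : Int × Int :=
  (PySem.Int.mod (1 - pvZellerH y m) 7, PySem.Int.mod (6 - pvWeekday y m 1) 7)

-- the Gregorian calendar repeats every 400 years; both formulas respect that
theorem pvZellerH_per (y m : Int) : pvZellerH (y + 400) m = pvZellerH y m := by
  have hm : ∀ (a b : Int), 0 < b → PySem.Int.mod a b = a % b :=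
    fun a b hb => PySem.Int.mod_eq_emod_of_pos hb
  have hd : ∀ (a b : Int), 0 < b → PySem.Int.floordiv a b = a / b :=
    fun a b hb => PySem.Int.floordiv_eq_ediv_of_pos hb
  have key : ∀ (C Y : Int),
      (C + (Y + 400) % 100 + (Y + 400) % 100 / 4 + (Y + 400) / 100 / 4 + 5 * ((Y + 400) / 100)) % 7
        = (C + Y % 100 + Y % 100 / 4 + Y / 100 / 4 + 5 * (Y / 100)) % 7 := by
    intro C Y
    have h1 : (Y + 400) % 100 = Y % 100 := by omega
    have h2 : (Y + 400) / 100 = Y / 100 + 4 := by omega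
    have h3 : (Y / 100 + 4) / 4 = Y / 100 / 4 + 1 := by omega
    rw [h1, h2, h3]
    omega
  simp only [pvZellerH, hm _ 100 (by omega : (0:Int) < 100), hm _ 7 (by omega : (0:Int) < 7),
    hd _ 5 (by omega : (0:Int) < 5), hd _ 4 (by omega : (0:Int) < 4),
    hd _ 100 (by omega : (0:Int) < 100)]
  by_cases h3 : m < 3 <;> simp only [h3, if_true, if_false]
  · have : y + 400 - 1 = (y - 1) + 400 := by ring
    rw [this]
    exact key _ _
  · exact key _ _

theorem pvIsLeap_per (y : Int) : pvIsLeap (y + 400) = pvIsLeap y := by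
  have hm : ∀ (a b : Int), 0 < b → PySem.Int.mod a b = a % b :=
    fun a b hb => PySem.Int.mod_eq_emod_of_pos hb
  have h4 : (y + 400) % 4 = y % 4 := by omega
  have h100 : (y + 400) % 100 = y % 100 := by omega
  have h400 : (y + 400) % 400 = y % 400 := by omega
  simp only [pvIsLeap, hm _ 4 (by omega : (0:Int) < 4), hm _ 100 (by omega : (0:Int) < 100),
    hm _ 400 (by omega : (0:Int) < 400), h4, h100, h400]

theorem pvWeekday_per (y m : Int) : pvWeekday (y + 400) m 1 = pvWeekday y m 1 := by
  have hm : ∀ (a b : Int), 0 < b → PySem.Int.mod a b = a % b :=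
    fun a b hb => PySem.Int.mod_eq_emod_of_pos hb
  have hd : ∀ (a b : Int), 0 < b → PySem.Int.floordiv a b = a / b :=
    fun a b hb => PySem.Int.floordiv_eq_ediv_of_pos hb
  have hD : pvDBM (y + 400) m = pvDBM y m := by
    simp only [pvDBM, pvIsLeap_per]
  have e0 : y + 400 - 1 = (y - 1) + 400 := by ring
  have e4 : ((y - 1) + 400) / 4 = (y - 1) / 4 + 100 := by omega
  have e100 : ((y - 1) + 400) / 100 = (y - 1) / 100 + 4 := by omega
  have e400 : ((y - 1) + 400) / 400 = (y - 1) / 400 + 1 := by omega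
  simp only [pvWeekday, hD, hm _ 7 (by omega : (0:Int) < 7),
    hd _ 4 (by omega : (0:Int) < 4), hd _ 100 (by omega : (0:Int) < 100),
    hd _ 400 (by omega : (0:Int) < 400), e0, e4, e100, e400]
  omega

theorem pvPair_per (y m : Int) : pvPair (y + 400) m = pvPair y m := by
  simp only [pvPair, pvZellerH_per, pvWeekday_per]

theorem pvPair_shift (m : Int) :
    ∀ (k : Nat) (z : Int), pvPair (z + 400 * k) m = pvPair z m := by
  intro k
  induction k with
  | zero => intro z; norm_num
  | succ n ih =>
    intro z
    have : z + 400 * ((n + 1 : Nat) : Int) = (z + 400 * n) + 400 := by push_cast; ring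
    rw [this, pvPair_per, ih]

theorem pvPair_mod (y m : Int) : pvPair y m = pvPair (y % 400) m := by
  rcases Int.lt_or_le (y / 400) 0 with hq | hq
  · have hy : y % 400 = y + 400 * (((-(y / 400)).toNat : Int)) := by
      rw [Int.toNat_of_nonneg (by omega)]; omega
    rw [hy, pvPair_shift]
  · have hy : y = y % 400 + 400 * ((y / 400).toNat : Int) := by
      rw [Int.toNat_of_nonneg hq]; omega
    conv_lhs => rw [hy]
    rw [pvPair_shift]

-- one 400-year cycle, checked by the kernel
def pvZellerCheck : Bool :=
  (List.range 400).all fun a => (List.range 12).all fun b =>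
    (pvPair (a : Int) ((b : Int) + 1)).1 == (pvPair (a : Int) ((b : Int) + 1)).2

set_option maxHeartbeats 1600000 in
set_option maxRecDepth 100000 in
theorem pvZellerCheck_true : pvZellerCheck = true := by decide

-- Zeller's congruence agrees with the ordinal-based weekday: first-Sunday offsets coincide
theorem pvZeller_eq (y m : Int) (h1 : 1 ≤ m) (h2 : m ≤ 12) :
    PySem.Int.mod (1 - pvZellerH y m) 7 = PySem.Int.mod (6 - pvWeekday y m 1) 7 := by
  have hpair : (pvPair y m).1 = (pvPair y m).2 := by
    rw [pvPair_mod y m]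
    have hc := pvZellerCheck_true
    simp only [pvZellerCheck, List.all_eq_true, List.mem_range, beq_iff_eq] at hc
    have hr : y % 400 = (((y % 400).toNat : Nat) : Int) := by
      rw [Int.toNat_of_nonneg (Int.emod_nonneg y (by omega))]
    have hmm : m = (((m - 1).toNat : Nat) : Int) + 1 := by omega
    rw [hr, hmm]
    exact hc _ (by omega) _ (by omega)
  simpa [pvPair] using hpair

theorem pvB_eq_abs (y m n : Int) (h1 : 1 ≤ m) (h2 : m ≤ 12) :
    get_nth_sunday_py_alt y m n = pvBAbs (pvWeekday y m 1) (pvMonthLen y m) n := by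
  simp only [get_nth_sunday_py_alt, pvBAbs]
  rw [pvLen_eq y m h1 h2, pvZeller_eq y m h1 h2,
      PySem.Int.mod_eq_emod_of_pos (by omega)]

theorem pvWd_bounds (y m : Int) : 0 ≤ pvWeekday y m 1 ∧ pvWeekday y m 1 < 7 := by
  exact ⟨PySem.Int.mod_nonneg _ (by omega), PySem.Int.mod_lt _ (by omega)⟩

theorem pvLen_bounds (y m : Int) (h1 : 1 ≤ m) (h2 : m ≤ 12) :
    28 ≤ pvMonthLen y m ∧ pvMonthLen y m ≤ 31 := by
  unfold pvMonthLen; split_ifs <;> omega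

-- the loop never returns when n is already passed or unreachable given the number of Sundays left
theorem pvSLoop_none (w n : Int) : ∀ (ds : List Int) (cnt : Int),
    (n ≤ cnt ∨ cnt + ((ds.countP (fun d => decide ((w + (d - 1)) % 7 = 6))).cast : Int) < n) →
    pvSLoop w n ds cnt = none := by
  intro ds
  induction ds with
  | nil => intro cnt _; rfl
  | cons d ds ih =>
    intro cnt h
    rw [List.countP_cons] at h
    simp only [pvSLoop]
    by_cases hd : (w + (d - 1)) % 7 = 6
    · rw [if_pos hd]
      simp only [hd, decide_true, if_pos] at h
      rw [if_neg (by push_cast at h ⊢; omega), ih (cnt + 1) (by push_cast at h ⊢; omega)]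
    · rw [if_neg hd]
      simp only [hd, decide_false, if_neg] at h
      exact ih cnt (by push_cast at h ⊢; omega)

theorem pvSundays_le_5 (w L : Int) (hw0 : 0 ≤ w) (hw : w < 7) (hL0 : 28 ≤ L) (hL : L ≤ 31) :
    (((PySem.List.pyRange 1 (L + 1) 1).countP (fun d => decide ((w + (d - 1)) % 7 = 6))) : Int) ≤ 5 := by
  interval_cases w <;> interval_cases L <;> decide

theorem pvKey (w L n : Int) (hw0 : 0 ≤ w) (hw : w < 7) (hL0 : 28 ≤ L) (hL : L ≤ 31)
    (hn0 : 1 ≤ n) (hn : n ≤ 5) : pvAAbs w L n = pvBAbs w L n := by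
  interval_cases w <;> interval_cases L <;> interval_cases n <;> decide

theorem pvAbs_eq (w L n : Int) (hw0 : 0 ≤ w) (hw : w < 7) (hL0 : 28 ≤ L) (hL : L ≤ 31) :
    pvAAbs w L n = pvBAbs w L n := by
  by_cases h : 1 ≤ n ∧ n ≤ 5
  · exact pvKey w L n hw0 hw hL0 hL h.1 h.2
  · have hA : pvAAbs w L n = L := by
      unfold pvAAbs
      rw [pvSLoop_none w n _ 0 ?_]
      rcases (by omega : n ≤ 0 ∨ 6 ≤ n) with h' | h'
      · exact Or.inl (by omega)
      · exact Or.inr (by have := pvSundays_le_5 w L hw0 hw hL0 hL; omega)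
    have hB : pvBAbs w L n = L := by
      unfold pvBAbs
      have hm0 : 0 ≤ (6 - w) % 7 := Int.emod_nonneg _ (by omega)
      have hm7 : (6 - w) % 7 < 7 := Int.emod_lt_of_pos _ (by omega)
      rw [if_neg (by omega)]
    rw [hA, hB]

-- ===== VERDICT (by name: the statement is the Claim_ definition above) =====
theorem get_nth_sunday_py_spec : Claim_equal_get_nth_sunday_py := by
  intro y m n _ hpre
  unfold Spec_get_nth_sunday_py
  rw [pvA_eq_abs, pvB_eq_abs y m n hpre.1 hpre.2]
  have hw := pvWd_bounds y m
  have hL := pvLen_bounds y m hpre.1 hpre.2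
  exact pvAbs_eq _ _ _ hw.1 hw.2 hL.1 hL.2
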